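-- pv_equiv track=rewrite | github.com/BDuong31/AlphaZero | lib/game/caro/caro_19x19_helpers.py | k_in_a_row
-- ===== SOURCE A (Python) =====
-- from typing import List, Tuple
--
-- def k_in_a_row(arr: List[int], k: int, token: int) -> bool:
--     """Kiểm tra xem có k quân liên tiếp của một loại token trong một mảng hay không.
--
--     Args:
--         arr (List[int]): Một danh sách các quân cờ (ví dụ: một hàng, một cột, hoặc một đường chéo).
--         k (int): Số lượng quân liên tiếp cần tìm.
--         token (int): Quân cờ cần kiểm tra.
--
--     Returns:
--         bool: True nếu tìm thấy k quân liên tiếp, False nếu ngược lại.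
--     """
--     assert k > 1, "Chúng tôi không xử lý các trường hợp tầm thường khi k <= 1"
--     if len(arr) < k:
--         # Không thể có k quân liên tiếp nếu độ dài mảng nhỏ hơn k
--         return False
--
--     current_consecutive = 0
--     for i in range(len(arr)):
--         if arr[i] == token:
--             current_consecutive += 1
--             if current_consecutive >= k:
--                 # Đã tìm thấy đủ k quân liên tiếp
--                 return True
--         else:
--             # Gặp một quân không khớp, đặt lại số lượng quân liên tiếp
--             current_consecutive = 0
--     return False
-- ===== SOURCE B (Python) =====
-- from itertools import groupby
--
-- def k_in_a_row(arr, k, token):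
--     """Run-segmentation: split arr into maximal consecutive runs with groupby,
--     then ask whether any run of `token` has length >= k."""
--     assert k > 1, "Chúng tôi không xử lý các trường hợp tầm thường khi k <= 1"
--     return any(key == token and sum(1 for _ in grp) >= k
--                for key, grp in groupby(arr))
-- ===== Notes on version B (the rewrite author's own statement) =====
-- stated objective: idiomatic
-- what changed: Replaced the reset-counter scan with itertools.groupby run-segmentation: the array is split into maximal consecutive runs and we test whether any run of the token has length >= k; the len(arr) < k guard disappears.
import Mathlib
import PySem

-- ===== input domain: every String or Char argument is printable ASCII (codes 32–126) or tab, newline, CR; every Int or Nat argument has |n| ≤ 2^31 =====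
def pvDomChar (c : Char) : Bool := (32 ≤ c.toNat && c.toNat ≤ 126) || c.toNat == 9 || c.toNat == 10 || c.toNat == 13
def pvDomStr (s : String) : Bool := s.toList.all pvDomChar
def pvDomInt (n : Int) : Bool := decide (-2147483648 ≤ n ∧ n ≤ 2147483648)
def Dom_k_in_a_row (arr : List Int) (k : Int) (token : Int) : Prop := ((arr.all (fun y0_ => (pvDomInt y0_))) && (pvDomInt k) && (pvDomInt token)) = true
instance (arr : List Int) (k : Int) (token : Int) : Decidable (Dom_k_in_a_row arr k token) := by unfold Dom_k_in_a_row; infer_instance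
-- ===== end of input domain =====

-- B replaces A's reset-counter scan by run-segmentation (groupby): more idiomatic, same cost.

-- ===== PORT A =====
-- A's for-loop with the running counter `current_consecutive` (early return on reaching k).
def kLoopA (k token : Int) : List Int → Int → Bool
  | [], _ => false
  | x :: rest, c =>
    if x = token then
      if c + 1 ≥ k then true else kLoopA k token rest (c + 1)
    else kLoopA k token rest 0

def k_in_a_row (arr : List Int) (k : Int) (token : Int) : Bool :=
  if (arr.length : Int) < k then false
  else kLoopA k token arr 0

-- ===== PORT B =====
-- itertools.groupby ported as maximal-run segmentation: each pair is (key, run length).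
def pyRuns : List Int → List (Int × Int)
  | [] => []
  | x :: rest =>
    match pyRuns rest with
    | (y, n) :: t => if x = y then (y, n + 1) :: t else (x, 1) :: (y, n) :: t
    | [] => [(x, 1)]

def k_in_a_row_alt (arr : List Int) (k : Int) (token : Int) : Bool :=
  (pyRuns arr).any (fun p => decide (p.1 = token ∧ k ≤ p.2))

-- ===== PRECONDITION & SPEC =====
-- Both A and B assert k > 1 (AssertionError otherwise), so k ≤ 1 is excluded.
def Pre_k_in_a_row (arr : List Int) (k : Int) (token : Int) : Prop := 1 < k
instance (arr : List Int) (k : Int) (token : Int) : Decidable (Pre_k_in_a_row arr k token) := by unfold Pre_k_in_a_row; infer_instance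
def pvWitness_k_in_a_row : List Int × Int × Int := ([1, 1, 0, 1], 2, 1)

def Spec_k_in_a_row (arr : List Int) (k : Int) (token : Int) (out : Bool) : Prop := out = k_in_a_row_alt arr k token
instance (arr : List Int) (k : Int) (token : Int) (out : Bool) : Decidable (Spec_k_in_a_row arr k token out) := by unfold Spec_k_in_a_row; infer_instance

-- ===== CLAIM (what is proved, stated in full; the proofs are below) =====
def Claim_equal_k_in_a_row : Prop := ∀ (arr : List Int) (k : Int) (token : Int), Dom_k_in_a_row arr k token → Pre_k_in_a_row arr k token → Spec_k_in_a_row arr k token (k_in_a_row arr k token)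

-- ===== LEMMAS AND PROOFS =====

-- length of the leading run of `token`
def leadTok (token : Int) : List Int → Int
  | [] => 0
  | x :: rest => if x = token then 1 + leadTok token rest else 0

theorem leadTok_nonneg (token : Int) (arr : List Int) : 0 ≤ leadTok token arr := by
  induction arr with
  | nil => simp [leadTok]
  | cons x rest ih => simp only [leadTok]; split <;> omega

theorem pyRuns_nil (arr : List Int) (h : pyRuns arr = []) : arr = [] := by
  cases arr with
  | nil => rfl
  | cons x rest =>
    exfalso
    simp only [pyRuns] at h
    cases hr : pyRuns rest with
    | nil => rw [hr] at h; simp at h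
    | cons p t => rw [hr] at h; rcases p with ⟨y, n⟩; dsimp at h; split at h <;> simp at h

theorem pyRuns_head (token : Int) : ∀ (arr : List Int) (y n : Int) (t : List (Int × Int)),
    pyRuns arr = (y, n) :: t → leadTok token arr = (if y = token then n else 0) ∧ 1 ≤ n := by
  intro arr
  induction arr with
  | nil => intro y n t h; simp [pyRuns] at h
  | cons x rest ih =>
    intro y n t h
    simp only [pyRuns] at h
    cases hr : pyRuns rest with
    | nil =>
      rw [hr] at h; dsimp at h
      have hrest : rest = [] := pyRuns_nil rest hr
      subst hrest
      simp only [List.cons.injEq, Prod.mk.injEq] at h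
      obtain ⟨⟨hy, hn⟩, -⟩ := h
      subst hy; subst hn
      simp [leadTok]
    | cons p t' =>
      rcases p with ⟨z, m⟩
      rw [hr] at h; dsimp at h
      obtain ⟨hlead, hm⟩ := ih z m t' hr
      by_cases hxz : x = z
      · rw [if_pos hxz] at h
        simp only [List.cons.injEq, Prod.mk.injEq] at h
        obtain ⟨⟨hy, hn⟩, -⟩ := h
        subst hy; subst hn; subst hxz
        refine ⟨?_, by omega⟩
        simp only [leadTok, hlead]
        by_cases hx : x = token
        · rw [if_pos hx, if_pos hx, if_pos hx]; omega
        · rw [if_neg hx, if_neg hx]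
      · rw [if_neg hxz] at h
        simp only [List.cons.injEq, Prod.mk.injEq] at h
        obtain ⟨⟨hy, hn⟩, -⟩ := h
        subst hy; subst hn
        refine ⟨?_, by omega⟩
        simp only [leadTok, hlead]
        by_cases hx : x = token
        · rw [if_pos hx, if_pos hx]
          have hz : ¬ z = token := fun hzz => hxz (hx.trans hzz.symm)
          rw [if_neg hz]; omega
        · rw [if_neg hx, if_neg hx]

theorem pyRuns_len_le : ∀ (arr : List Int) (y n : Int), (y, n) ∈ pyRuns arr → n ≤ (arr.length : Int) := by
  intro arr
  induction arr with
  | nil => intro y n h; simp [pyRuns] at h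
  | cons x rest ih =>
    intro y n h
    simp only [pyRuns] at h
    cases hr : pyRuns rest with
    | nil =>
      rw [hr] at h; dsimp at h
      simp only [List.mem_singleton, Prod.mk.injEq] at h
      obtain ⟨-, hn⟩ := h
      simp [hn]
    | cons p t =>
      rcases p with ⟨z, m⟩
      rw [hr] at h; dsimp at h
      have hlen : (rest.length : Int) + 1 = ((x :: rest).length : Int) := by simp
      split at h
      · rcases List.mem_cons.1 h with h1 | h1
        · have hm := ih z m (hr ▸ List.mem_cons_self ..)
          simp only [Prod.mk.injEq] at h1
          obtain ⟨-, hn⟩ := h1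
          omega
        · have := ih y n (hr ▸ List.mem_cons_of_mem _ h1)
          omega
      · rcases List.mem_cons.1 h with h1 | h1
        · simp only [Prod.mk.injEq] at h1
          obtain ⟨-, hn⟩ := h1
          simp [hn]
        · have := ih y n (hr ▸ h1)
          omega

-- The core invariant: A's loop with counter c answers "k ≤ c + leading token run, or some run long enough".
theorem kLoopA_eq (k token : Int) : ∀ (arr : List Int) (c : Int), 0 ≤ c → c < k →
    kLoopA k token arr c =
      (decide (k ≤ c + leadTok token arr) || (pyRuns arr).any (fun p => decide (p.1 = token ∧ k ≤ p.2))) := by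
  intro arr
  induction arr with
  | nil =>
    intro c h0 hc
    simp only [kLoopA, pyRuns, leadTok, List.any_nil, Bool.or_false]
    simp; omega
  | cons x rest ih =>
    intro c h0 hc
    by_cases hx : x = token
    · simp only [kLoopA, leadTok, if_pos hx]
      by_cases hk : c + 1 ≥ k
      · rw [if_pos hk]
        have hl := leadTok_nonneg token rest
        have hd : decide (k ≤ c + (1 + leadTok token rest)) = true := by simp; omega
        rw [hd]; simp
      · rw [if_neg hk]
        rw [ih (c + 1) (by omega) (by omega)]
        cases hr : pyRuns rest with
        | nil =>
          have hrest : rest = [] := pyRuns_nil rest hr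
          subst hrest
          simp only [pyRuns, List.any_cons, List.any_nil, leadTok]
          simp [hx]; omega
        | cons p t =>
          rcases p with ⟨z, m⟩
          obtain ⟨hlead, hm⟩ := pyRuns_head token rest z m t hr
          simp only [pyRuns, hr]; dsimp
          by_cases hxz : x = z
          · have hz : z = token := hxz.symm.trans hx
            rw [if_pos hz] at hlead
            rw [if_pos hxz, hlead]
            simp only [List.any_cons]
            by_cases h1 : k ≤ c + 1 + m
            · have d1 : decide (k ≤ c + 1 + m) = true := by simp; omega
              have d2 : decide (k ≤ c + (1 + m)) = true := by simp; omega
              rw [d1, d2]; simp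
            · have d1 : decide (k ≤ c + 1 + m) = false := by simp; omega
              have d2 : decide (k ≤ c + (1 + m)) = false := by simp; omega
              have d3 : decide (z = token ∧ k ≤ m) = false := by simp; omega
              have d4 : decide (z = token ∧ k ≤ m + 1) = false := by simp; omega
              rw [d1, d2, d3, d4]
          · rw [if_neg hxz]
            have hz : ¬ z = token := fun hzz => hxz (hx.trans hzz.symm)
            rw [if_neg hz] at hlead
            rw [hlead]
            simp only [List.any_cons]
            have d1 : decide (k ≤ c + 1 + 0) = false := by simp; omega
            have d2 : decide (k ≤ c + (1 + 0)) = false := by simp; omega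
            have d3 : decide (x = token ∧ k ≤ (1 : Int)) = false := by simp; omega
            rw [d1, d2, d3]
            simp
    · simp only [kLoopA, leadTok, if_neg hx]
      rw [ih 0 le_rfl (by omega)]
      have dcl : decide (k ≤ c + 0) = false := by simp; omega
      rw [dcl, Bool.false_or, Int.zero_add]
      cases hr : pyRuns rest with
      | nil =>
        have hrest : rest = [] := pyRuns_nil rest hr
        subst hrest
        simp only [pyRuns, List.any_cons, List.any_nil, leadTok]
        simp [hx]; omega
      | cons p t =>
        rcases p with ⟨z, m⟩
        obtain ⟨hlead, hm⟩ := pyRuns_head token rest z m t hr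
        simp only [pyRuns, hr]; dsimp
        by_cases hxz : x = z
        · rw [if_pos hxz]
          have hz : ¬ z = token := fun hzz => hx (hxz.trans hzz)
          rw [if_neg hz] at hlead
          rw [hlead]
          simp only [List.any_cons]
          have d1 : decide (k ≤ (0 : Int)) = false := by simp; omega
          have d2 : decide (z = token ∧ k ≤ m) = false := by simp [hz]
          have d3 : decide (z = token ∧ k ≤ m + 1) = false := by simp [hz]
          rw [d1, d2, d3]
          simp
        · rw [if_neg hxz, hlead]
          simp only [List.any_cons]
          have d3 : decide (x = token ∧ k ≤ (1 : Int)) = false := by simp [hx]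
          rw [d3, Bool.false_or]
          by_cases hz : z = token
          · rw [if_pos hz]
            by_cases h1 : k ≤ m
            · have e1 : decide (k ≤ m) = true := by simp; omega
              have e2 : decide (z = token ∧ k ≤ m) = true := by simp [hz]; omega
              rw [e1, e2]; simp
            · have e1 : decide (k ≤ m) = false := by simp; omega
              have e2 : decide (z = token ∧ k ≤ m) = false := by simp; omega
              rw [e1, e2]; simp
          · rw [if_neg hz]
            have e1 : decide (k ≤ (0 : Int)) = false := by simp; omega
            rw [e1]; simp

-- ===== VERDICT (by name: the statement is the Claim_ definition above) =====
theorem k_in_a_row_spec : Claim_equal_k_in_a_row := by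
  intro arr k token _ hk
  unfold Spec_k_in_a_row k_in_a_row k_in_a_row_alt
  unfold Pre_k_in_a_row at hk
  by_cases hlen : (arr.length : Int) < k
  · rw [if_pos hlen]
    symm
    rw [List.any_eq_false]
    rintro ⟨y, n⟩ hmem
    have := pyRuns_len_le arr y n hmem
    simp; omega
  · rw [if_neg hlen]
    rw [kLoopA_eq k token arr 0 le_rfl (by omega)]
    cases hr : pyRuns arr with
    | nil =>
      have : arr = [] := pyRuns_nil arr hr
      subst this
      simp [leadTok]; omega
    | cons p t =>
      rcases p with ⟨y, n⟩
      obtain ⟨hlead, hn⟩ := pyRuns_head token arr y n t hr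
      simp only [List.any_cons]
      by_cases hy : y = token
      · rw [if_pos hy] at hlead
        rw [hlead]
        by_cases h1 : k ≤ n
        · have d1 : decide (k ≤ 0 + n) = true := by simp; omega
          have d2 : decide (y = token ∧ k ≤ n) = true := by simp [hy]; omega
          rw [d1, d2]; simp
        · have d1 : decide (k ≤ 0 + n) = false := by simp; omega
          have d2 : decide (y = token ∧ k ≤ n) = false := by simp; omega
          rw [d1, d2]; simp
      · rw [if_neg hy] at hlead
        rw [hlead]
        have d1 : decide (k ≤ (0 : Int) + 0) = false := by simp; omega
        have d2 : decide (y = token ∧ k ≤ n) = false := by simp [hy]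
        rw [d1, d2]; simp
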